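-- pv_equiv track=rewrite | github.com/hyunjinjeong/leetcode | 3572-maximize-ysum-by-picking-a-triplet-of-distinct-xvalues/3572-maximize-ysum-by-picking-a-triplet-of-distinct-xvalues.py | maxSumDistinctTriplet
-- ===== SOURCE A (Python) =====
-- from typing import List
--
-- def maxSumDistinctTriplet(x: List[int], y: List[int]) -> int:
--     # x[i]를 그룹으로 묶어서 y[i]가 가장 높은 아이템만 남기면 되지 않을까
--     # 그러면 그냥 3개 뽑아서 max를 구하면 됨
--     # 1 2 1 3 2 / 5 3 4 6 2 의 경우
--     # 1 2 3 / 5 3 6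
--     N = len(x)
--
--     group = {}
--     for i in range(N):
--         group[x[i]] = max(y[i], group.get(x[i], 0))
--
--     if len(group) < 3:
--         return -1
--
--     return sum(sorted(group.values(), reverse=True)[:3])
-- ===== SOURCE B (Python) =====
-- def maxSumDistinctTriplet(x, y):
--     # Sort the (x, y) pairs by x so each x-group is a contiguous run,
--     # then fold each run into its running maximum in one scan.
--     pairs = sorted(zip(x, y), key=lambda p: p[0])
--     maxima = []
--     prev = None
--     cur = 0
--     for a, b in pairs:
--         if prev is not None and a == prev:
--             cur = max(cur, b)
--         else:
--             if prev is not None: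
--                 maxima.append(cur)
--             prev = a
--             cur = max(0, b)
--     if prev is not None:
--         maxima.append(cur)
--
--     if len(maxima) < 3:
--         return -1
--
--     maxima.sort(reverse=True)
--     return maxima[0] + maxima[1] + maxima[2]
-- ===== Notes on version B (the rewrite author's own statement) =====
-- stated objective: alternative
-- what changed: B replaces A's dictionary of running group maxima by zipping x with y, sorting the pairs by x so each x-group becomes a contiguous run, folding each run into its (0-clamped) maximum in a single scan, and summing the three largest maxima; A's hash-grouping pass disappears entirely.
import Mathlib
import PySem

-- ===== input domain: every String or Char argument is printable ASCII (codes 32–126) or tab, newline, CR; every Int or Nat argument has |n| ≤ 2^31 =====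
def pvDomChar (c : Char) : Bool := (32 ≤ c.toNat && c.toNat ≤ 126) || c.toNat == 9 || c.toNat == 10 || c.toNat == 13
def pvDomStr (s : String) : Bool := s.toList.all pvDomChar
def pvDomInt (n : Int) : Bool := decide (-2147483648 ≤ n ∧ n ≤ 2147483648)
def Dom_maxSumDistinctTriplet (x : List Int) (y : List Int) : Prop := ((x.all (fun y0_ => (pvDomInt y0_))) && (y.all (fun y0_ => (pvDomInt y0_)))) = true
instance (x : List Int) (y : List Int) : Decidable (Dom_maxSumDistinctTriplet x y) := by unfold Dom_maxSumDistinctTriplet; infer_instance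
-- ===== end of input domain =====

-- B replaces A's dictionary of group maxima by a sort-by-x pass whose contiguous runs
-- are folded into per-group maxima in one scan (objective: alternative, same result).

-- ===== PORT A =====
-- A's loop indexes y[i]; inside Pre_ (len x ≤ len y) every index is in range, so the
-- pyGetD default 0 is never read where the claim applies (outside Pre_ Python raises).
def maxSumDistinctTriplet (x : List Int) (y : List Int) : Int :=
  let N : Int := (x.length : Int)
  let group : PySem.Dict Int Int :=
    (PySem.List.pyRange 0 N 1).foldl
      (fun d i =>
        d.insert (PySem.List.pyGetD x i 0)
          (max (PySem.List.pyGetD y i 0) (d.getD (PySem.List.pyGetD x i 0) 0)))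
      PySem.Dict.empty
  if group.size < 3 then -1
  else (PySem.List.slice (PySem.List.sorted group.values (fun v => v) true) none (some 3)).sum

-- ===== PORT B =====
-- the loop body of Source B: state is (maxima, prev, cur)
def bstep (s : List Int × Option Int × Int) (p : Int × Int) : List Int × Option Int × Int :=
  if s.2.1 = some p.1 then (s.1, s.2.1, max s.2.2 p.2)
  else if s.2.1 = none then (s.1, some p.1, max 0 p.2)
  else (s.1 ++ [s.2.2], some p.1, max 0 p.2)

-- the final 'if prev is not None: maxima.append(cur)' of Source B
def bflush (s : List Int × Option Int × Int) : List Int :=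
  match s.2.1 with
  | none => s.1
  | some _ => s.1 ++ [s.2.2]

def maxSumDistinctTriplet_alt (x : List Int) (y : List Int) : Int :=
  let pairs := PySem.List.sorted (x.zip y) (fun p => p.1)
  let maxima := bflush (pairs.foldl bstep ([], none, 0))
  if maxima.length < 3 then -1
  else
    let m := PySem.List.sorted maxima (fun v => v) true
    PySem.List.pyGetD m 0 0 + PySem.List.pyGetD m 1 0 + PySem.List.pyGetD m 2 0

-- ===== PRECONDITION & SPEC =====
-- Pre_ excludes only the inputs with len y < len x, on which A raises IndexError at y[i].
def Pre_maxSumDistinctTriplet (x : List Int) (y : List Int) : Prop := x.length ≤ y.length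
instance (x : List Int) (y : List Int) : Decidable (Pre_maxSumDistinctTriplet x y) := by
  unfold Pre_maxSumDistinctTriplet; infer_instance

def pvWitness_maxSumDistinctTriplet : List Int × List Int := ([1, 2, 1, 3, 2], [5, 3, 4, 6, 2])

def Spec_maxSumDistinctTriplet (x : List Int) (y : List Int) (out : Int) : Prop :=
  out = maxSumDistinctTriplet_alt x y
instance (x : List Int) (y : List Int) (out : Int) : Decidable (Spec_maxSumDistinctTriplet x y out) := by
  unfold Spec_maxSumDistinctTriplet; infer_instance

-- ===== CLAIM (what is proved, stated in full; the proofs are below) =====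
def Claim_equal_maxSumDistinctTriplet : Prop :=
  ∀ (x : List Int) (y : List Int), Dom_maxSumDistinctTriplet x y →
    Pre_maxSumDistinctTriplet x y →
    Spec_maxSumDistinctTriplet x y (maxSumDistinctTriplet x y)

-- ===== LEMMAS AND PROOFS =====

-- clamped running maximum of the y's of group k (A's dict value, B's recorded run value)
def gmax (ps : List (Int × Int)) (k : Int) : Int :=
  ps.foldl (fun b p => if p.1 = k then max b p.2 else b) 0

-- A's dict-update step, over the zipped pairs
def dstep (d : PySem.Dict Int Int) (p : Int × Int) : PySem.Dict Int Int :=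
  d.insert p.1 (max p.2 (d.getD p.1 0))

theorem foldl_gstep_nop (k : Int) (ps : List (Int × Int)) (b : Int)
    (h : ∀ p ∈ ps, p.1 ≠ k) :
    ps.foldl (fun b p => if p.1 = k then max b p.2 else b) b = b := by
  induction ps generalizing b with
  | nil => rfl
  | cons p t ih =>
    simp only [List.foldl_cons, if_neg (h p (List.mem_cons_self))]
    exact ih _ (fun q hq => h q (List.mem_cons_of_mem _ hq))

theorem gmax_zero (ps : List (Int × Int)) (k : Int) (h : k ∉ ps.map (·.1)) :
    gmax ps k = 0 := by
  refine foldl_gstep_nop k ps 0 (fun p hp hk => h ?_)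
  exact hk ▸ List.mem_map_of_mem hp

theorem gmax_append (ps : List (Int × Int)) (p : Int × Int) (k : Int) :
    gmax (ps ++ [p]) k = if p.1 = k then max (gmax ps k) p.2 else gmax ps k := by
  simp only [gmax, List.foldl_append, List.foldl_cons, List.foldl_nil]

theorem gmax_perm (ps qs : List (Int × Int)) (h : ps.Perm qs) (k : Int) :
    gmax ps k = gmax qs k := by
  unfold gmax
  haveI : RightCommutative (fun (b : Int) (p : Int × Int) => if p.1 = k then max b p.2 else b) :=
    ⟨by intro b p q; split_ifs <;> simp [max_right_comm]⟩
  exact h.foldl_eq 0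

-- A's dict after the loop: keys are the distinct x's in first-occurrence order,
-- each carrying its clamped group maximum.
theorem dict_items (ps : List (Int × Int)) :
    (ps.foldl dstep PySem.Dict.empty).items
      = (PySem.Set.ofList (ps.map (·.1))).map (fun k => (k, gmax ps k)) := by
  induction ps using List.reverseRecOn with
  | nil => rfl
  | append_singleton ps p ih =>
    rw [List.foldl_append, List.foldl_cons, List.foldl_nil]
    set d := ps.foldl dstep PySem.Dict.empty with hd
    have hkeys : d.keys = PySem.Set.ofList (ps.map (·.1)) := by
      simp [PySem.Dict.keys, ih, List.map_map, Function.comp_def]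
    have hnd : d.keys.Nodup := by rw [hkeys]; exact PySem.Set.nodup_ofList _
    have hmapfst : (ps ++ [p]).map (·.1) = ps.map (·.1) ++ [p.1] := by simp
    by_cases hm : p.1 ∈ PySem.Set.ofList (ps.map (·.1))
    · have hc : d.contains p.1 = true := by
        rw [PySem.Dict.contains_eq_decide_mem_keys, hkeys]; simpa using hm
      have hget : d.getD p.1 0 = gmax ps p.1 := by
        refine PySem.Dict.getD_of_mem_items d ?_ hnd 0
        rw [ih]; exact List.mem_map_of_mem hm
      show (d.insert p.1 (max p.2 (d.getD p.1 0))).items = _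
      rw [PySem.Dict.items_insert_of_contains d _ hc, ih, List.map_map, hmapfst,
        PySem.Set.ofList_append_singleton, PySem.Set.add_of_mem hm]
      refine List.map_congr_left (fun k hk => ?_)
      by_cases hkp : k = p.1
      · subst hkp
        simp [hget, gmax_append, max_comm]
      · simp only [Function.comp_apply, gmax_append]
        rw [if_neg (by simpa using hkp), if_neg (fun h => hkp h.symm)]
    · have hc : d.contains p.1 = false := by
        rw [PySem.Dict.contains_eq_decide_mem_keys, hkeys]; simpa using hm
      have hget : d.getD p.1 0 = 0 := PySem.Dict.getD_of_not_contains d 0 hc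
      have hnotmem : p.1 ∉ ps.map (·.1) := fun hmem => hm ((PySem.Set.mem_ofList _ _).mpr hmem)
      show (d.insert p.1 (max p.2 (d.getD p.1 0))).items = _
      rw [PySem.Dict.items_insert_of_not_contains d _ hc, ih, hmapfst,
        PySem.Set.ofList_append_singleton, PySem.Set.add_of_not_mem hm, List.map_append]
      congr 1
      · refine List.map_congr_left (fun k hk => ?_)
        have hkp : p.1 ≠ k := fun h => hm (h ▸ hk)
        simp [gmax_append, hkp]
      · simp [hget, gmax_append, gmax_zero ps p.1 hnotmem, max_comm]

-- B's scan: a run of pairs with the current x only grows cur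
theorem run_skip (run : List (Int × Int)) (rest : List (Int × Int)) (k : Int)
    (m : List Int) (c : Int) (h : ∀ q ∈ run, q.1 = k) :
    (run ++ rest).foldl bstep (m, some k, c)
      = rest.foldl bstep (m, some k, run.foldl (fun c q => max c q.2) c) := by
  induction run generalizing c with
  | nil => rfl
  | cons q t ih =>
    have hq : q.1 = k := h q (List.mem_cons_self)
    have e : bstep (m, some k, c) q = (m, some k, max c q.2) := by
      simp [bstep, hq]
    rw [List.cons_append, List.foldl_cons, e, List.foldl_cons]
    exact ih _ (fun r hr => h r (List.mem_cons_of_mem _ hr))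

-- once the run is over, flushing cur now or at the next new x is the same
theorem fresh_restart (rest : List (Int × Int)) (k : Int) (m : List Int) (c : Int)
    (h : ∀ q ∈ rest, q.1 ≠ k) :
    bflush (rest.foldl bstep (m, some k, c))
      = bflush (rest.foldl bstep (m ++ [c], none, 0)) := by
  cases rest with
  | nil => rfl
  | cons q t =>
    have hq : q.1 ≠ k := h q (List.mem_cons_self)
    have e1 : bstep (m, some k, c) q = (m ++ [c], some q.1, max 0 q.2) := by
      simp [bstep, Ne.symm hq]
    have e2 : bstep (m ++ [c], none, 0) q = (m ++ [c], some q.1, max 0 q.2) := by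
      simp [bstep]
    rw [List.foldl_cons, List.foldl_cons, e1, e2]

theorem discard_of_not_mem (s : List Int) (k : Int) (h : k ∉ s) :
    PySem.Set.discard s k = s := by
  simp only [PySem.Set.discard]
  refine List.filter_eq_self.mpr (fun a ha => ?_)
  have : a ≠ k := fun he => h (he ▸ ha)
  simpa using this

-- first occurrences of (k :: run-of-k ++ keys-not-containing-k)
theorem ofList_head_run (k : Int) (l1 l2 : List Int)
    (h1 : ∀ a ∈ l1, a = k) (h2 : k ∉ l2) :
    PySem.Set.ofList (k :: (l1 ++ l2)) = k :: PySem.Set.ofList l2 := by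
  induction l1 with
  | nil =>
    rw [List.nil_append, PySem.Set.ofList_cons, discard_of_not_mem]
    intro hmem; exact h2 ((PySem.Set.mem_ofList _ _).mp hmem)
  | cons a t ih =>
    have ha : a = k := h1 a (List.mem_cons_self)
    subst ha
    have iht := ih (fun b hb => h1 b (List.mem_cons_of_mem _ hb))
    rw [List.cons_append, PySem.Set.ofList_cons, iht]
    simp only [PySem.Set.discard, List.filter_cons]
    rw [show ((!(a == a)) = false) by simp]
    simp only [Bool.false_eq_true, if_false]
    congr 1
    refine List.filter_eq_self.mpr (fun b hb => ?_)
    have : b ≠ a := fun he => h2 (he ▸ ((PySem.Set.mem_ofList _ _).mp hb))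
    simpa using this

-- B's scan over a list sorted by x yields the clamped group maxima,
-- keyed by the distinct x's in sorted order.
theorem scan_char : ∀ (n : Nat) (qs : List (Int × Int)), qs.length ≤ n →
    qs.Pairwise (fun p q => p.1 ≤ q.1) → ∀ (m : List Int) (c : Int),
    bflush (qs.foldl bstep (m, none, c))
      = m ++ (PySem.Set.ofList (qs.map (·.1))).map (fun k => gmax qs k) := by
  intro n
  induction n with
  | zero =>
    intro qs hlen _ m c
    have hqs : qs = [] := List.eq_nil_of_length_eq_zero (Nat.le_zero.mp hlen)
    subst hqs; simp [bflush]
  | succ n ih =>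
    intro qs hlen hpw m c
    cases qs with
    | nil => simp [bflush]
    | cons p t =>
      obtain ⟨hpt, ht⟩ := List.pairwise_cons.mp hpw
      have hteq : t.takeWhile (fun q => q.1 == p.1) ++ t.dropWhile (fun q => q.1 == p.1) = t :=
        List.takeWhile_append_dropWhile
      have hrun : ∀ q ∈ t.takeWhile (fun q => q.1 == p.1), q.1 = p.1 := by
        intro q hq; simpa using List.mem_takeWhile_imp hq
      have hrest : ∀ q ∈ t.dropWhile (fun q => q.1 == p.1), p.1 < q.1 := by
        intro q hq
        have hne : t.dropWhile (fun q => q.1 == p.1) ≠ [] := List.ne_nil_of_mem hq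
        obtain ⟨r0, rt, hre⟩ : ∃ r0 rt, t.dropWhile (fun q => q.1 == p.1) = r0 :: rt := by
          cases hc : t.dropWhile (fun q => q.1 == p.1) with
          | nil => exact absurd hc hne
          | cons r0 rt => exact ⟨r0, rt, rfl⟩
        have hr0ne : r0.1 ≠ p.1 := by
          have hhd := List.head_dropWhile_not (fun q => q.1 == p.1) (l := t) hne
          have hh : (t.dropWhile (fun q => q.1 == p.1)).head hne = r0 := by
            have h? : (t.dropWhile (fun q => q.1 == p.1)).head? = some r0 := by
              rw [hre]; rfl
            have := List.head?_eq_head (l := t.dropWhile (fun q => q.1 == p.1)) hne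
            rw [this] at h?
            exact Option.some.inj h?
          rw [hh] at hhd
          simpa using hhd
        have hr0t : r0 ∈ t := by
          rw [← hteq, hre]; exact List.mem_append_right _ (List.mem_cons_self)
        have hpr0 : p.1 < r0.1 := lt_of_le_of_ne (hpt r0 hr0t) (Ne.symm hr0ne)
        have hpw_rest : (t.dropWhile (fun q => q.1 == p.1)).Pairwise (fun p q => p.1 ≤ q.1) := by
          have h2 := ht
          rw [← hteq] at h2
          exact (List.pairwise_append.mp h2).2.1
        rw [hre] at hq
        rcases List.mem_cons.mp hq with rfl | hq'
        · exact hpr0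
        · have : r0.1 ≤ q.1 := by
            rw [hre] at hpw_rest
            exact (List.pairwise_cons.mp hpw_rest).1 q hq'
          exact lt_of_lt_of_le hpr0 this
      have hpw_rest : (t.dropWhile (fun q => q.1 == p.1)).Pairwise (fun p q => p.1 ≤ q.1) := by
        have h2 := ht
        rw [← hteq] at h2
        exact (List.pairwise_append.mp h2).2.1
      have hlen_rest : (t.dropWhile (fun q => q.1 == p.1)).length ≤ n := by
        have h1 : (t.takeWhile (fun q => q.1 == p.1)).length
            + (t.dropWhile (fun q => q.1 == p.1)).length = t.length := by
          rw [← List.length_append, hteq]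
        simp only [List.length_cons] at hlen
        omega
      -- compute the left-hand side
      have e0 : bstep (m, none, c) p = (m, some p.1, max 0 p.2) := by
        simp [bstep]
      rw [List.foldl_cons, e0, ← hteq,
        run_skip _ _ p.1 m _ hrun,
        fresh_restart _ p.1 m _ (fun q hq => ne_of_gt (hrest q hq)),
        ih _ hlen_rest hpw_rest]
      -- compute the key set
      have key_set : PySem.Set.ofList ((p :: (t.takeWhile (fun q => q.1 == p.1)
            ++ t.dropWhile (fun q => q.1 == p.1))).map (·.1))
          = p.1 :: PySem.Set.ofList ((t.dropWhile (fun q => q.1 == p.1)).map (·.1)) := by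
        rw [List.map_cons, List.map_append]
        refine ofList_head_run p.1 _ _ ?_ ?_
        · intro a ha
          obtain ⟨q, hq, rfl⟩ := List.mem_map.mp ha
          exact hrun q hq
        · intro hmem
          obtain ⟨q, hq, he⟩ := List.mem_map.mp hmem
          exact (ne_of_gt (hrest q hq)) he
      rw [key_set, List.map_cons]
      -- head value: gmax over the whole list equals the run's folded cur
      have head_val :
          gmax (p :: (t.takeWhile (fun q => q.1 == p.1) ++ t.dropWhile (fun q => q.1 == p.1))) p.1
            = (t.takeWhile (fun q => q.1 == p.1)).foldl (fun c q => max c q.2) (max 0 p.2) := by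
        unfold gmax
        rw [List.foldl_cons, if_pos rfl, List.foldl_append]
        rw [PySem.List.foldl_congr_mem (t.takeWhile (fun q => q.1 == p.1))
          (fun b p_1 => if p_1.1 = p.1 then max b p_1.2 else b) (fun c q => max c q.2) _
          (fun b q hq => by simp [hrun q hq])]
        exact foldl_gstep_nop p.1 _ _ (fun q hq => ne_of_gt (hrest q hq))
      -- tail values: keys after the run never occur in the head run
      have tail_val : ∀ k ∈ PySem.Set.ofList ((t.dropWhile (fun q => q.1 == p.1)).map (·.1)),
          gmax (t.dropWhile (fun q => q.1 == p.1)) k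
            = gmax (p :: (t.takeWhile (fun q => q.1 == p.1) ++ t.dropWhile (fun q => q.1 == p.1))) k := by
        intro k hk
        obtain ⟨q0, hq0, rfl⟩ := List.mem_map.mp ((PySem.Set.mem_ofList _ _).mp hk)
        have hklt : p.1 < q0.1 := hrest q0 hq0
        unfold gmax
        rw [show (p :: (t.takeWhile (fun q => q.1 == p.1) ++ t.dropWhile (fun q => q.1 == p.1)))
            = (p :: t.takeWhile (fun q => q.1 == p.1)) ++ t.dropWhile (fun q => q.1 == p.1) from rfl,
          List.foldl_append]
        rw [foldl_gstep_nop q0.1 (p :: t.takeWhile (fun q => q.1 == p.1)) 0 ?_]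
        intro r hr
        rcases List.mem_cons.mp hr with rfl | hr'
        · exact ne_of_lt hklt
        · rw [hrun r hr']; exact ne_of_lt hklt
      rw [List.map_congr_left tail_val] at *
      rw [head_val.symm] at *
      simp [List.append_assoc]

-- sorted(· , reverse=True) of a permutation is the same list (Int values, no key)
theorem sorted_rev_eq_of_perm (l1 l2 : List Int) (h : l1.Perm l2) :
    PySem.List.sorted l1 (fun v => v) true = PySem.List.sorted l2 (fun v => v) true := by
  have hperm : (PySem.List.sorted l1 (fun v => v) true).Perm
      (PySem.List.sorted l2 (fun v => v) true) :=
    (PySem.List.sorted_perm l1 _ true).trans (h.trans (PySem.List.sorted_perm l2 _ true).symm)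
  have hpw1 := PySem.List.sorted_pairwise_rev l1 (fun v => v)
  have hpw2 := PySem.List.sorted_pairwise_rev l2 (fun v => v)
  have hrev : (PySem.List.sorted l1 (fun v => v) true).reverse
      = (PySem.List.sorted l2 (fun v => v) true).reverse := by
    refine PySem.List.eq_of_perm_of_pairwise_le_of_injective (fun v => v)
      Function.injective_id ?_ ?_ ?_
    · exact ((PySem.List.sorted l1 (fun v => v) true).reverse_perm.trans hperm).trans
        (PySem.List.sorted l2 (fun v => v) true).reverse_perm.symm
    · exact List.pairwise_reverse.mpr hpw1
    · exact List.pairwise_reverse.mpr hpw2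
  exact List.reverse_injective hrev

-- A's index loop over range(N) is the fold of dstep over the zipped pairs
theorem dict_idx_zip (x y : List Int) (n : Nat) (hx : n ≤ x.length) (hy : n ≤ y.length) :
    (PySem.List.pyRange 0 ((n : Nat) : Int) 1).foldl
      (fun d i =>
        PySem.Dict.insert d (PySem.List.pyGetD x i 0)
          (max (PySem.List.pyGetD y i 0) (PySem.Dict.getD d (PySem.List.pyGetD x i 0) 0)))
      PySem.Dict.empty
    = ((x.zip y).take n).foldl dstep PySem.Dict.empty := by
  induction n with
  | zero =>
    rw [show ((0 : Nat) : Int) = 0 from rfl, PySem.List.pyRange_one_eq_nil le_rfl]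
    rfl
  | succ k ih =>
    have hcast : ((k + 1 : Nat) : Int) = ((k : Nat) : Int) + 1 := by push_cast; ring
    rw [hcast, PySem.List.pyRange_one_succ_right (by positivity), List.foldl_append,
      ih (by omega) (by omega)]
    have hzlen : k < (x.zip y).length := by
      rw [List.length_zip]; omega
    rw [List.take_succ, List.getElem?_eq_getElem hzlen, List.getElem_zip]
    simp only [Option.toList_some, List.foldl_append, List.foldl_cons, List.foldl_nil]
    rw [PySem.List.pyGetD_ofNat x k 0 (by omega), PySem.List.pyGetD_ofNat y k 0 (by omega)]
    rfl

theorem main_eq (x y : List Int) (hpre : x.length ≤ y.length) :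
    maxSumDistinctTriplet x y = maxSumDistinctTriplet_alt x y := by
  simp only [maxSumDistinctTriplet, maxSumDistinctTriplet_alt]
  have hzlen : (x.zip y).length = x.length := by
    rw [List.length_zip]; omega
  have hidx : (PySem.List.pyRange 0 ((x.length : Nat) : Int) 1).foldl
      (fun d i =>
        PySem.Dict.insert d (PySem.List.pyGetD x i 0)
          (max (PySem.List.pyGetD y i 0) (PySem.Dict.getD d (PySem.List.pyGetD x i 0) 0)))
      PySem.Dict.empty
      = (x.zip y).foldl dstep PySem.Dict.empty := by
    rw [dict_idx_zip x y x.length le_rfl hpre, ← hzlen, List.take_length]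
  rw [hidx]
  set ps := x.zip y with hps
  have hitems := dict_items ps
  have hvalues : (ps.foldl dstep PySem.Dict.empty).values
      = (PySem.Set.ofList (ps.map (·.1))).map (fun k => gmax ps k) := by
    simp [PySem.Dict.values, hitems, List.map_map, Function.comp_def]
  have hvlen : (ps.foldl dstep PySem.Dict.empty).values.length
      = (ps.foldl dstep PySem.Dict.empty).size := by
    simp [PySem.Dict.values, PySem.Dict.size]
  -- B side
  set qs := PySem.List.sorted ps (fun p => p.1) with hqs
  have hpairs_perm : qs.Perm ps := PySem.List.sorted_perm ps _ false
  have hpw : qs.Pairwise (fun a b => a.1 ≤ b.1) := PySem.List.sorted_pairwise ps (fun p => p.1)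
  have hmax : bflush (qs.foldl bstep ([], none, 0))
      = (PySem.Set.ofList (qs.map (·.1))).map (fun k => gmax qs k) := by
    have := scan_char qs.length qs le_rfl hpw [] 0
    simpa using this
  rw [List.map_congr_left (fun k _ => gmax_perm qs ps hpairs_perm k)] at hmax
  have hKperm : (PySem.Set.ofList (qs.map (·.1))).Perm (PySem.Set.ofList (ps.map (·.1))) := by
    refine (List.perm_ext_iff_of_nodup (PySem.Set.nodup_ofList _) (PySem.Set.nodup_ofList _)).mpr ?_
    intro a
    rw [PySem.Set.mem_ofList, PySem.Set.mem_ofList]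
    exact (hpairs_perm.map (·.1)).mem_iff
  have hmaxperm : (bflush (qs.foldl bstep ([], none, 0))).Perm
      ((ps.foldl dstep PySem.Dict.empty).values) := by
    rw [hmax, hvalues]; exact hKperm.map _
  have hlen : (bflush (qs.foldl bstep ([], none, 0))).length
      = (ps.foldl dstep PySem.Dict.empty).size := by
    rw [hmaxperm.length_eq, hvlen]
  by_cases hguard : (ps.foldl dstep PySem.Dict.empty).size < 3
  · rw [if_pos hguard, if_pos (by rw [hlen]; exact hguard)]
  · rw [if_neg hguard, if_neg (by rw [hlen]; exact hguard)]
    have hs : PySem.List.sorted ((ps.foldl dstep PySem.Dict.empty).values) (fun v => v) true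
        = PySem.List.sorted (bflush (qs.foldl bstep ([], none, 0))) (fun v => v) true :=
      sorted_rev_eq_of_perm _ _ hmaxperm.symm
    rw [← hs]
    set s := PySem.List.sorted ((ps.foldl dstep PySem.Dict.empty).values) (fun v => v) true with hsdef
    have hslen : 3 ≤ s.length := by
      rw [hsdef, PySem.List.length_sorted, hvlen]; omega
    obtain ⟨a, b, cc, t, hs3⟩ : ∃ a b cc t, s = a :: b :: cc :: t := by
      rcases s with _ | ⟨a, _ | ⟨b, _ | ⟨cc, t⟩⟩⟩ <;> simp at hslen
      exact ⟨a, b, cc, t, rfl⟩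
    rw [hs3, PySem.List.slice_to _ (by norm_num : (0 : Int) ≤ 3)]
    have e0 : PySem.List.pyGetD (a :: b :: cc :: t) 0 0 = a := by simp [pysem]
    have e1 : PySem.List.pyGetD (a :: b :: cc :: t) 1 0 = b := by simp [pysem]
    have e2 : PySem.List.pyGetD (a :: b :: cc :: t) 2 0 = cc := by simp [pysem]
    rw [e0, e1, e2]
    simp [show Int.toNat 3 = 3 from rfl, List.take]
    ring

-- ===== VERDICT (by name: the statement is the Claim_ definition above) =====
theorem maxSumDistinctTriplet_spec : Claim_equal_maxSumDistinctTriplet := by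
  intro x y _ hpre
  unfold Spec_maxSumDistinctTriplet
  exact main_eq x y hpre
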